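-- pv_equiv track=rewrite | github.com/guidorombola/EDD-UNTREF | Practicas-Parciales/primer-parcial/1er-parcial-2015/Ejercicio2.py | grados_ent
-- ===== SOURCE A (Python) =====
-- def grados_ent(matriz):
--     dicc = {}
--     for fila in range(len(matriz)):
--         for col in range(len(matriz[fila])):
--             dicc.setdefault(col+1, 0)
--             if matriz[fila][col] != 0:
--                 dicc[col+1] +=1
--     return dicc
-- ===== SOURCE B (Python) =====
-- def grados_ent(matriz):
--     # Column-major: one pass over the rows per column, instead of A's row-major cell walk.
--     if not matriz:
--         return {}
--     max_cols = max(len(f) for f in matriz)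
--     return {c + 1: sum(1 for f in matriz if c < len(f) and f[c] != 0)
--             for c in range(max_cols)}
-- ===== Notes on version B (the rewrite author's own statement) =====
-- stated objective: alternative
-- what changed: B inverts A's row-major dict-building walk (setdefault + increment per cell) into a column-major construction: it computes max_cols once and builds the result dict column-by-column, each value a single counting pass over the rows with a bounds check for ragged rows.
import Mathlib
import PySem

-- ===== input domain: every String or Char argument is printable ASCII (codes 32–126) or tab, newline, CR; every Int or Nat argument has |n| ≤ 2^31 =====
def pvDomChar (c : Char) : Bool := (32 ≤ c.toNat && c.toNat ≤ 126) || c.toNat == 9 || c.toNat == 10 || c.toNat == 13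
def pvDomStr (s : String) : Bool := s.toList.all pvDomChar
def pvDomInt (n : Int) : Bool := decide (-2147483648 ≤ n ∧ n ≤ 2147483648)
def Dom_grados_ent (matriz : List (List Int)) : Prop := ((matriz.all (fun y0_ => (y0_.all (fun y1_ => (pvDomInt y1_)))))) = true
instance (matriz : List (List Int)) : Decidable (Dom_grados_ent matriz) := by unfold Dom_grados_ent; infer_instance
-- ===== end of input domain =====

-- B replaces A's row-major cell walk with a dict by a column-major per-column count
-- over the rows; objective: alternative decomposition, same asymptotic cost.

-- ===== PORT A =====
def grados_ent (matriz : List (List Int)) : List (Int × Int) :=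
  ((PySem.List.pyRange 0 (matriz.length : Int) 1).foldl (fun dicc fila =>
      let f := PySem.List.pyGetD matriz fila []
      (PySem.List.pyRange 0 (f.length : Int) 1).foldl (fun dicc col =>
          let dicc := dicc.setdefault (col + 1) 0
          if PySem.List.pyGetD f col 0 ≠ 0 then
            dicc.insert (col + 1) (dicc.getD (col + 1) 0 + 1)
          else dicc) dicc)
    (PySem.Dict.empty : PySem.Dict Int Int)).items

-- ===== PORT B =====
def grados_ent_alt (matriz : List (List Int)) : List (Int × Int) :=
  match matriz with
  | [] => []
  | _ =>
    let max_cols : Int := ((matriz.map (fun f => (f.length : Int))).max?).getD 0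
    (PySem.List.pyRange 0 max_cols 1).map (fun c =>
      (c + 1, matriz.foldl (fun acc f =>
          if c < (f.length : Int) ∧ PySem.List.pyGetD f c 0 ≠ 0 then acc + 1 else acc) 0))

-- ===== PRECONDITION & SPEC =====
def Spec_grados_ent (matriz : List (List Int)) (out : List (Int × Int)) : Prop := out = grados_ent_alt matriz
instance (matriz : List (List Int)) (out : List (Int × Int)) : Decidable (Spec_grados_ent matriz out) := by unfold Spec_grados_ent; infer_instance

-- ===== CLAIM (what is proved, stated in full; the proofs are below) =====
def Claim_equal_grados_ent : Prop := ∀ (matriz : List (List Int)), Dom_grados_ent matriz → Spec_grados_ent matriz (grados_ent matriz)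

-- ===== LEMMAS AND PROOFS =====

-- count of nonzero entries in column c over the rows of m
def colCnt (m : List (List Int)) (c : Nat) : Int :=
  (m.countP (fun f => decide (c < f.length) && decide (f.getD c 0 ≠ 0)) : Int)

def maxLen (m : List (List Int)) : Nat := m.foldr (fun f a => max f.length a) 0

-- the dict-items list after processing rows p and the first L cells of row f, keys 1..K
def mtable2 (p : List (List Int)) (f : List Int) (L K : Nat) : List (Int × Int) :=
  (List.range K).map (fun (c : Nat) =>
    ((c : Int) + 1, colCnt p c + if c < L ∧ f.getD c 0 ≠ 0 then (1 : Int) else 0))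

def table (m : List (List Int)) (M : Nat) : List (Int × Int) :=
  (List.range M).map (fun (c : Nat) => ((c : Int) + 1, colCnt m c))

-- A's inner-loop body
def innerF (f : List Int) (dicc : PySem.Dict Int Int) (col : Int) : PySem.Dict Int Int :=
  let dicc := dicc.setdefault (col + 1) 0
  if PySem.List.pyGetD f col 0 ≠ 0 then
    dicc.insert (col + 1) (dicc.getD (col + 1) 0 + 1)
  else dicc

lemma colCnt_zero (p : List (List Int)) (M c : Nat) (hM : ∀ g ∈ p, g.length ≤ M)
    (hc : M ≤ c) : colCnt p c = 0 := by
  unfold colCnt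
  rw [List.countP_eq_zero.2]
  · simp
  · intro g hg
    have := hM g hg
    simp only [Bool.and_eq_true, decide_eq_true_eq]
    rintro ⟨h1, -⟩; omega

lemma table_eq_mtable2_zero (p : List (List Int)) (f : List Int) (M : Nat) :
    table p M = mtable2 p f 0 M := by
  unfold table mtable2
  refine List.map_congr_left (fun c _ => ?_)
  simp

lemma keys_mk_mtable2 (p : List (List Int)) (f : List Int) (L K : Nat) :
    (PySem.Dict.mk (mtable2 p f L K)).keys = (List.range K).map (fun (c : Nat) => ((c : Int) + 1)) := by
  unfold PySem.Dict.keys mtable2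
  rw [List.map_map]
  rfl

lemma nodup_keys_mtable2 (p : List (List Int)) (f : List Int) (L K : Nat) :
    (PySem.Dict.mk (mtable2 p f L K)).keys.Nodup := by
  rw [keys_mk_mtable2]
  refine List.Nodup.map ?_ (List.nodup_range)
  intro a b h
  dsimp only at h
  omega

lemma contains_mtable2 (p : List (List Int)) (f : List Int) (L K L' : Nat) :
    (PySem.Dict.mk (mtable2 p f L K)).contains ((L' : Int) + 1) = decide (L' < K) := by
  rw [PySem.Dict.contains_eq_decide_mem_keys, keys_mk_mtable2]
  refine decide_eq_decide.2 ?_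
  simp only [List.mem_map, List.mem_range]
  constructor
  · rintro ⟨c, hc, he⟩
    have : c = L' := by omega
    omega
  · intro h
    exact ⟨L', h, rfl⟩

lemma mem_mtable2 (p : List (List Int)) (f : List Int) (L K L' : Nat) (h : L' < K) :
    ((L' : Int) + 1, colCnt p L' + if L' < L ∧ f.getD L' 0 ≠ 0 then (1 : Int) else 0)
      ∈ mtable2 p f L K := by
  unfold mtable2
  exact List.mem_map.2 ⟨L', List.mem_range.2 h, rfl⟩

lemma getD_mtable2 (p : List (List Int)) (f : List Int) (L K L' : Nat) (h : L' < K) :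
    (PySem.Dict.mk (mtable2 p f L K)).getD ((L' : Int) + 1) 0
      = colCnt p L' + if L' < L ∧ f.getD L' 0 ≠ 0 then (1 : Int) else 0 :=
  PySem.Dict.getD_of_mem_items _ (mem_mtable2 p f L K L' h) (nodup_keys_mtable2 p f L K) 0

-- setting up column L: setdefault extends the key range to max M (L+1)
lemma setdefault_mtable2 (p : List (List Int)) (f : List Int) (L M : Nat)
    (hM : ∀ g ∈ p, g.length ≤ M) :
    (PySem.Dict.mk (mtable2 p f L (max M L))).setdefault ((L : Int) + 1) 0
      = PySem.Dict.mk (mtable2 p f L (max M (L + 1))) := by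
  by_cases hc : L < max M L
  · have hM' : max M (L + 1) = max M L := by omega
    rw [PySem.Dict.setdefault_of_contains _ _ (by rw [contains_mtable2]; simpa using hc), hM']
  · have hML : M ≤ L := by omega
    have h1 : max M L = L := by omega
    have h2 : max M (L + 1) = L + 1 := by omega
    rw [PySem.Dict.setdefault_of_not_contains _ _ (by rw [contains_mtable2]; simpa using hc)]
    apply PySem.Dict.ext
    rw [PySem.Dict.items_insert_of_not_contains _ _ (by rw [contains_mtable2]; simpa using hc)]
    show mtable2 p f L (max M L) ++ [((L : Int) + 1, 0)]
        = (PySem.Dict.mk (mtable2 p f L (max M (L + 1)))).items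
    rw [h1, h2]
    unfold mtable2
    rw [List.range_succ, List.map_append]
    congr 1
    have hz : colCnt p L = 0 := colCnt_zero p M L hM hML
    have hnL : ¬ (L < L ∧ f.getD L 0 ≠ 0) := by
      rintro ⟨h, -⟩; omega
    rw [List.map_singleton, if_neg hnL, hz]
    norm_num

-- incrementing column L when the cell is nonzero
lemma insert_mtable2 (p : List (List Int)) (f : List Int) (L K : Nat)
    (hK : L < K) (hnz : f.getD L 0 ≠ 0) :
    (PySem.Dict.mk (mtable2 p f L K)).insert ((L : Int) + 1)
        ((PySem.Dict.mk (mtable2 p f L K)).getD ((L : Int) + 1) 0 + 1)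
      = PySem.Dict.mk (mtable2 p f (L + 1) K) := by
  have hg : (PySem.Dict.mk (mtable2 p f L K)).getD ((L : Int) + 1) 0 = colCnt p L := by
    rw [getD_mtable2 p f L K L hK, if_neg (by rintro ⟨h, -⟩; omega), add_zero]
  rw [hg]
  apply PySem.Dict.ext
  rw [PySem.Dict.items_insert_of_contains _ _ (by rw [contains_mtable2]; simpa using hK)]
  show (mtable2 p f L K).map
        (fun q => if q.1 == (L : Int) + 1 then ((L : Int) + 1, colCnt p L + 1) else q)
      = mtable2 p f (L + 1) K
  unfold mtable2
  rw [List.map_map]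
  refine List.map_congr_left (fun c hc => ?_)
  simp only [Function.comp_apply, beq_iff_eq]
  by_cases hcL : c = L
  · subst hcL
    rw [if_pos rfl, if_pos ⟨Nat.lt_succ_self _, hnz⟩]
  · have hne : ¬ (((c : Int) + 1) = ((L : Int) + 1)) := by omega
    rw [if_neg hne]
    have hiff : (c < L + 1 ∧ f.getD c 0 ≠ 0) ↔ (c < L ∧ f.getD c 0 ≠ 0) := by
      constructor <;> rintro ⟨h1, h2⟩ <;> exact ⟨by omega, h2⟩
    rw [if_congr hiff rfl rfl]

-- skipping column L when the cell is zero
lemma mtable2_succ_of_zero (p : List (List Int)) (f : List Int) (L K : Nat)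
    (hz : f.getD L 0 = 0) : mtable2 p f (L + 1) K = mtable2 p f L K := by
  unfold mtable2
  refine List.map_congr_left (fun c _ => ?_)
  by_cases hcL : c = L
  · subst hcL
    rw [if_neg (by rintro ⟨-, h2⟩; exact h2 hz), if_neg (by rintro ⟨h1, -⟩; omega)]
  · have hiff : (c < L + 1 ∧ f.getD c 0 ≠ 0) ↔ (c < L ∧ f.getD c 0 ≠ 0) := by
      constructor <;> rintro ⟨h1, h2⟩ <;> exact ⟨by omega, h2⟩
    rw [if_congr hiff rfl rfl]

-- one inner-loop step
lemma innerF_step (p : List (List Int)) (f : List Int) (L M : Nat)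
    (hM : ∀ g ∈ p, g.length ≤ M) :
    innerF f (PySem.Dict.mk (mtable2 p f L (max M L))) ((L : Int))
      = PySem.Dict.mk (mtable2 p f (L + 1) (max M (L + 1))) := by
  unfold innerF
  rw [setdefault_mtable2 p f L M hM]
  rw [PySem.List.pyGetD_natCast]
  by_cases hnz : f.getD L 0 ≠ 0
  · rw [if_pos hnz]
    exact insert_mtable2 p f L (max M (L + 1)) (by omega) hnz
  · rw [if_neg hnz]
    rw [mtable2_succ_of_zero p f L _ (not_not.1 hnz)]

-- the whole inner loop
lemma inner_loop (p : List (List Int)) (f : List Int) (M : Nat)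
    (hM : ∀ g ∈ p, g.length ≤ M) :
    ∀ L, L ≤ f.length →
      (PySem.List.pyRange 0 (L : Int) 1).foldl (innerF f) (PySem.Dict.mk (table p M))
        = PySem.Dict.mk (mtable2 p f L (max M L)) := by
  intro L
  induction L with
  | zero =>
    intro _
    simp only [Nat.cast_zero]
    rw [show PySem.List.pyRange 0 0 1 = ([] : List Int) from by decide, List.foldl_nil,
      show max M 0 = M from by omega, table_eq_mtable2_zero p f M]
  | succ L ih =>
    intro hL
    have h1 : ((L + 1 : Nat) : Int) = (L : Int) + 1 := by push_cast; ring
    rw [h1, PySem.List.pyRange_one_succ_right (by positivity), List.foldl_append,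
      ih (by omega), List.foldl_cons, List.foldl_nil]
    exact innerF_step p f L M hM

lemma cnt_singleton (f : List Int) (c : Nat) :
    (if (decide (c < f.length) && decide (f.getD c 0 ≠ 0)) = true then (1 : Int) else 0)
      = if c < f.length ∧ f.getD c 0 ≠ 0 then (1 : Int) else 0 := by
  by_cases h : c < f.length ∧ f.getD c 0 ≠ 0
  · rw [if_pos h, if_pos (by simp only [Bool.and_eq_true, decide_eq_true_eq]; exact ⟨h.1, h.2⟩)]
  · rw [if_neg h, if_neg (by simp only [Bool.and_eq_true, decide_eq_true_eq]; exact fun hc => h hc)]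

lemma colCnt_append_singleton (p : List (List Int)) (f : List Int) (c : Nat) :
    colCnt (p ++ [f]) c = colCnt p c + if c < f.length ∧ f.getD c 0 ≠ 0 then (1 : Int) else 0 := by
  unfold colCnt
  rw [List.countP_append]
  push_cast
  congr 1
  rw [List.countP_singleton]
  push_cast
  exact cnt_singleton f c

lemma mtable2_full (p : List (List Int)) (f : List Int) (M : Nat) :
    mtable2 p f f.length (max M f.length) = table (p ++ [f]) (max M f.length) := by
  unfold mtable2 table
  refine List.map_congr_left (fun c _ => ?_)
  rw [colCnt_append_singleton]

lemma mem_le_maxLen (m : List (List Int)) : ∀ g ∈ m, g.length ≤ maxLen m := by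
  induction m with
  | nil => intro g hg; simp at hg
  | cons f m ih =>
    intro g hg
    rcases List.mem_cons.1 hg with h | h
    · subst h
      show g.length ≤ max g.length (maxLen m)
      exact Nat.le_max_left _ _
    · have := ih g h
      show g.length ≤ max f.length (maxLen m)
      omega

lemma maxLen_append_singleton (p : List (List Int)) (f : List Int) :
    maxLen (p ++ [f]) = max (maxLen p) f.length := by
  induction p with
  | nil =>
    show max f.length 0 = max 0 f.length
    omega
  | cons g p ih =>
    show max g.length (maxLen (p ++ [f])) = max (max g.length (maxLen p)) f.length
    rw [ih]
    omega

-- the whole outer loop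
lemma outer_loop : ∀ (m p : List (List Int)),
    m.foldl (fun dicc f => (PySem.List.pyRange 0 (f.length : Int) 1).foldl (innerF f) dicc)
        (PySem.Dict.mk (table p (maxLen p)))
      = PySem.Dict.mk (table (p ++ m) (maxLen (p ++ m))) := by
  intro m
  induction m with
  | nil => intro p; simp
  | cons f m ih =>
    intro p
    rw [List.foldl_cons,
      inner_loop p f (maxLen p) (mem_le_maxLen p) f.length (le_refl _),
      mtable2_full p f (maxLen p)]
    have h : max (maxLen p) f.length = maxLen (p ++ [f]) := (maxLen_append_singleton p f).symm
    rw [h]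
    have := ih (p ++ [f])
    simpa using this

lemma grados_ent_eq_foldl (matriz : List (List Int)) :
    grados_ent matriz
      = (matriz.foldl
          (fun dicc f => (PySem.List.pyRange 0 (f.length : Int) 1).foldl (innerF f) dicc)
          (PySem.Dict.empty : PySem.Dict Int Int)).items :=
  congrArg PySem.Dict.items
    (PySem.List.foldl_pyRange_zero_pyGetD' matriz []
      (fun dicc f => (PySem.List.pyRange 0 (f.length : Int) 1).foldl (innerF f) dicc)
      PySem.Dict.empty)

lemma grados_ent_eq_table (matriz : List (List Int)) :
    grados_ent matriz = table matriz (maxLen matriz) := by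
  rw [grados_ent_eq_foldl]
  have he : (PySem.Dict.empty : PySem.Dict Int Int) = PySem.Dict.mk (table [] (maxLen [])) := rfl
  rw [he, outer_loop matriz []]
  simp

-- ===== B side =====
lemma B_cnt (c : Nat) : ∀ (m : List (List Int)) (acc : Int),
    m.foldl (fun acc f =>
        if (c : Int) < (f.length : Int) ∧ PySem.List.pyGetD f (c : Int) 0 ≠ 0 then acc + 1 else acc)
      acc = acc + colCnt m c := by
  intro m
  induction m with
  | nil => intro acc; simp [colCnt]
  | cons f m ih =>
    intro acc
    rw [List.foldl_cons, ih]
    have hcond : ((c : Int) < (f.length : Int) ∧ PySem.List.pyGetD f (c : Int) 0 ≠ 0)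
        ↔ (c < f.length ∧ f.getD c 0 ≠ 0) := by
      rw [PySem.List.pyGetD_natCast]
      constructor <;> rintro ⟨h1, h2⟩ <;> exact ⟨by exact_mod_cast h1, h2⟩
    rw [if_congr hcond rfl rfl]
    unfold colCnt
    rw [List.countP_cons]
    push_cast
    rw [cnt_singleton f c]
    split_ifs with h <;> ring

lemma foldl_max_lengths : ∀ (m : List (List Int)) (a : Int), 0 ≤ a →
    (m.map (fun g => (g.length : Int))).foldl max a = max a (maxLen m : Int) := by
  intro m
  induction m with
  | nil => intro a ha; unfold maxLen; simp; omega
  | cons f m ih =>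
    intro a ha
    rw [List.map_cons, List.foldl_cons, ih _ (by positivity)]
    unfold maxLen
    simp only [List.foldr_cons]
    push_cast
    omega

lemma grados_ent_alt_eq_table (matriz : List (List Int)) :
    grados_ent_alt matriz = table matriz (maxLen matriz) := by
  cases matriz with
  | nil => rfl
  | cons f m =>
    show (PySem.List.pyRange 0 ((((f :: m).map (fun g => (g.length : Int))).max?).getD 0) 1).map _
        = table (f :: m) (maxLen (f :: m))
    have hmax : (((f :: m).map (fun g => (g.length : Int))).max?).getD 0
        = (maxLen (f :: m) : Int) := by
      rw [List.map_cons]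
      show (Option.some ((m.map (fun g => (g.length : Int))).foldl max (f.length : Int))).getD 0
          = (maxLen (f :: m) : Int)
      rw [Option.getD_some, foldl_max_lengths m (f.length : Int) (by positivity)]
      unfold maxLen
      simp only [List.foldr_cons]
      push_cast
      omega
    rw [hmax, PySem.List.pyRange_zero_natCast, List.map_map]
    unfold table
    refine List.map_congr_left (fun c _ => ?_)
    simp only [Function.comp_apply]
    rw [B_cnt c (f :: m) 0]
    simp

-- ===== VERDICT (by name: the statement is the Claim_ definition above) =====
theorem grados_ent_spec : Claim_equal_grados_ent := by
  intro matriz _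
  unfold Spec_grados_ent
  rw [grados_ent_eq_table, grados_ent_alt_eq_table]
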